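-- pv_equiv track=rewrite | github.com/odessey01/confetti_chaos | src/main.py | next_player_select_index
-- ===== SOURCE A (Python) =====
-- def next_player_select_index(current_index: int, direction: int, selectable: tuple[bool, ...]) -> int:
--     option_count = len(selectable)
--     if option_count <= 0:
--         return 0
--     if not any(selectable):
--         return 0
--     step = -1 if direction < 0 else 1
--     index = current_index
--     for _ in range(option_count):
--         index = (index + step) % option_count
--         if selectable[index]:
--             return index
--     return current_index
-- ===== SOURCE B (Python) =====
-- def next_player_select_index(current_index, direction, selectable):
--     option_count = len(selectable)
--     if option_count <= 0:
--         return 0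
--     idx = [i for i, s in enumerate(selectable) if s]
--     if not idx:
--         return 0
--     start = current_index % option_count
--     if direction < 0:
--         pos = sum(1 for j in idx if j < start) - 1
--         return idx[pos] if pos >= 0 else idx[-1]
--     pos = sum(1 for j in idx if j <= start)
--     return idx[pos] if pos < len(idx) else idx[0]
-- ===== Notes on version B (the rewrite author's own statement) =====
-- stated objective: alternative
-- what changed: Replaced A's position-by-position wrapping modular scan (up to n steps, re-testing selectable[] each step) by building the sorted table of selectable indices once and answering with a rank (count-of-smaller, the linear analogue of bisect) lookup: first table entry above start for forward, last entry below start for backward, wrapping to the table's first/last entry.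
import Mathlib
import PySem

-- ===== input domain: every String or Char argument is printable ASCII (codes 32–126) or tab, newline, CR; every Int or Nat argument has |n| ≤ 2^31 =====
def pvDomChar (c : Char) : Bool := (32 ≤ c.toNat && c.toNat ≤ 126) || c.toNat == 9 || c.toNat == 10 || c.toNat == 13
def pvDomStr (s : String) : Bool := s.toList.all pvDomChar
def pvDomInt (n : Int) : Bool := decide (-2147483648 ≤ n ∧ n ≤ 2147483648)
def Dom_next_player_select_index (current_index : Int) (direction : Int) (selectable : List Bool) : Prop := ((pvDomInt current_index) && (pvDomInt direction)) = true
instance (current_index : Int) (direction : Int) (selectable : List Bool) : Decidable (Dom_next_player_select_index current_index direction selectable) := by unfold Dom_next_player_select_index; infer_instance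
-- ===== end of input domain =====

-- B replaces A's position-by-position wrapping scan by a table of the selectable indices plus a
-- rank (count-of-smaller) lookup, the linear analogue of bisect; objective: alternative decomposition.

-- ===== PORT A =====
-- A's for-loop with early return: fuel = option_count iterations, state = index; the final `ci`
-- is A's fall-through `return current_index`. selectable[index'] is exact via pyGetD because
-- index' = (index + step) % option_count always lies in range when option_count > 0.
def pvLoopA (sel : List Bool) (n step ci : Int) : Nat → Int → Int
  | 0, _ => ci
  | f+1, index =>
    let index' := PySem.Int.mod (index + step) n
    if PySem.List.pyGetD sel index' false then index'
    else pvLoopA sel n step ci f index'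

def next_player_select_index (current_index : Int) (direction : Int) (selectable : List Bool) : Int :=
  let option_count : Int := (selectable.length : Int)
  if option_count ≤ 0 then 0
  else if !(selectable.any (fun b => b)) then 0
  else
    let step : Int := if direction < 0 then -1 else 1
    pvLoopA selectable option_count step current_index selectable.length current_index

-- ===== PORT B =====
-- [i for i, s in enumerate(selectable) if s]
def pvIdx (sel : List Bool) : List Int :=
  (PySem.List.enumerate sel 0).filterMap (fun p => if p.2 then some p.1 else none)

def next_player_select_index_alt (current_index : Int) (direction : Int) (selectable : List Bool) : Int :=
  let option_count : Int := (selectable.length : Int)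
  if option_count ≤ 0 then 0
  else
    let idx := pvIdx selectable
    if idx = [] then 0
    else
      let start := PySem.Int.mod current_index option_count
      if direction < 0 then
        -- sum(1 for j in idx if j < start) is a countP
        let pos : Int := (idx.countP (fun j => decide (j < start)) : Int) - 1
        if 0 ≤ pos then PySem.List.pyGetD idx pos 0 else PySem.List.pyGetD idx (-1) 0
      else
        let pos : Int := (idx.countP (fun j => decide (j ≤ start)) : Int)
        if pos < (idx.length : Int) then PySem.List.pyGetD idx pos 0 else PySem.List.pyGetD idx 0 0

-- ===== PRECONDITION & SPEC =====
def Spec_next_player_select_index (current_index : Int) (direction : Int) (selectable : List Bool) (out : Int) : Prop := out = next_player_select_index_alt current_index direction selectable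
instance (current_index : Int) (direction : Int) (selectable : List Bool) (out : Int) : Decidable (Spec_next_player_select_index current_index direction selectable out) := by unfold Spec_next_player_select_index; infer_instance

-- ===== CLAIM (what is proved, stated in full; the proofs are below) =====
def Claim_equal_next_player_select_index : Prop := ∀ (current_index : Int) (direction : Int) (selectable : List Bool), Dom_next_player_select_index current_index direction selectable → Spec_next_player_select_index current_index direction selectable (next_player_select_index current_index direction selectable)

-- ===== LEMMAS AND PROOFS =====

-- membership in the index table
theorem pv_mem_idx (sel : List Bool) (j : Int) :
    j ∈ pvIdx sel ↔ ∃ (k : Nat) (h : k < sel.length), j = (k : Int) ∧ sel[k] = true := by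
  simp only [pvIdx, List.mem_filterMap, PySem.List.mem_enumerate_iff]
  constructor
  · rintro ⟨p, ⟨k, hk, rfl⟩, hp⟩
    simp only [zero_add] at hp
    by_cases h : sel[k] = true
    · simp [h] at hp; exact ⟨k, hk, hp.symm ▸ by simp, h⟩
    · simp [Bool.not_eq_true] at h; simp [h] at hp
  · rintro ⟨k, hk, rfl, hsel⟩
    exact ⟨((0:Int)+k, sel[k]), ⟨k, hk, rfl⟩, by simp [hsel]⟩

-- the index table is strictly increasing
theorem pv_idx_pairwise (sel : List Bool) : (pvIdx sel).Pairwise (· < ·) := by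
  unfold pvIdx
  have h := PySem.List.pairwise_lt_enumerate (xs := sel) (s := 0)
  rw [List.pairwise_filterMap]
  refine h.imp ?_
  rintro ⟨i, bi⟩ ⟨j, bj⟩ hij x hx y hy
  by_cases hbi : bi <;> by_cases hbj : bj <;> simp_all

-- the table is empty iff nothing is selectable
theorem pv_idx_nil (sel : List Bool) : pvIdx sel = [] ↔ sel.any (fun b => b) = false := by
  unfold pvIdx
  rw [List.filterMap_eq_nil_iff]
  simp only [PySem.List.mem_enumerate_iff, List.any_eq_false]
  constructor
  · intro h b hb
    obtain ⟨k, hk, rfl⟩ := List.mem_iff_getElem.mp hb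
    have := h ((0:Int)+k, sel[k]) ⟨k, hk, rfl⟩
    by_cases hs : sel[k] = true
    · simp [hs] at this
    · simpa using hs
  · rintro h ⟨i, b⟩ ⟨k, hk, heq⟩
    have hb : b = sel[k] := by injection heq with h1 h2
    have := h sel[k] (List.getElem_mem hk)
    simp [hb, this]

-- rank lemmas on a strictly increasing list
theorem pv_rank_le {l : List Int} (hs : l.Pairwise (· < ·)) (s : Int) :
    ∀ (i : Nat) (h : i < l.length), (l[i] ≤ s ↔ i < l.countP (fun j => decide (j ≤ s))) := by
  induction l with
  | nil => intro i h; simp at h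
  | cons a t ih =>
    have hat : ∀ x ∈ t, a < x := fun x hx => List.rel_of_pairwise_cons hs hx
    have ht := List.Pairwise.of_cons hs
    intro i h
    rw [List.countP_cons]
    by_cases ha : a ≤ s
    · simp only [ha, decide_true, if_true]
      match i with
      | 0 => simpa using by omega
      | i+1 =>
        simp only [List.getElem_cons_succ]
        rw [ih ht i (by simpa using h)]
        omega
    · have htz : t.countP (fun j => decide (j ≤ s)) = 0 := by
        rw [List.countP_eq_zero]
        intro x hx
        simp only [decide_eq_true_eq]
        have := hat x hx; omega
      simp only [htz]
      rw [if_neg (by simpa using ha)]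
      match i with
      | 0 => simpa using by omega
      | i+1 =>
        simp only [List.getElem_cons_succ]
        constructor
        · intro hle
          have := hat (t[i]'(by simpa using h)) (List.getElem_mem _)
          omega
        · omega

theorem pv_rank_lt {l : List Int} (hs : l.Pairwise (· < ·)) (s : Int) :
    ∀ (i : Nat) (h : i < l.length), (l[i] < s ↔ i < l.countP (fun j => decide (j < s))) := by
  induction l with
  | nil => intro i h; simp at h
  | cons a t ih =>
    have hat : ∀ x ∈ t, a < x := fun x hx => List.rel_of_pairwise_cons hs hx
    have ht := List.Pairwise.of_cons hs
    intro i h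
    rw [List.countP_cons]
    by_cases ha : a < s
    · simp only [ha, decide_true, if_true]
      match i with
      | 0 => simpa using by omega
      | i+1 =>
        simp only [List.getElem_cons_succ]
        rw [ih ht i (by simpa using h)]
        omega
    · have htz : t.countP (fun j => decide (j < s)) = 0 := by
        rw [List.countP_eq_zero]
        intro x hx
        simp only [decide_eq_true_eq]
        have := hat x hx; omega
      simp only [htz]
      rw [if_neg (by simpa using ha)]
      match i with
      | 0 => simpa using by omega
      | i+1 =>
        simp only [List.getElem_cons_succ]
        constructor
        · intro hle
          have := hat (t[i]'(by simpa using h)) (List.getElem_mem _)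
          omega
        · omega

-- monotonicity of a strictly increasing list
theorem pv_mono {l : List Int} (hs : l.Pairwise (· < ·)) {i j : Nat} (hij : i ≤ j)
    (hj : j < l.length) : l[i]'(by omega) ≤ l[j] := by
  rcases Nat.lt_or_ge i j with h | h
  · exact le_of_lt ((List.pairwise_iff_getElem.mp hs) i j (by omega) hj h)
  · have : i = j := by omega
    subst this; rfl

-- find? returns the first satisfying element
theorem pv_find?_eq_some {α : Type} (p : α → Bool) :
    ∀ (l : List α) (j : Nat) (hj : j < l.length),
      (∀ (i : Nat) (h : i < j), p (l[i]'(by omega)) = false) → p l[j] = true →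
      l.find? p = some l[j] := by
  intro l
  induction l with
  | nil => intro j hj; simp at hj
  | cons a t ih =>
    intro j hj hbef hp
    match j with
    | 0 => simp only [List.getElem_cons_zero] at hp ⊢; rw [List.find?_cons_of_pos hp]
    | j+1 =>
      have ha : p a = false := hbef 0 (by omega)
      rw [List.find?_cons_of_neg (by simp [ha])]
      simp only [List.getElem_cons_succ] at hp ⊢
      exact ih j (by simpa using hj) (fun i h => hbef (i+1) (by omega)) hp

-- absorb an emod on the left of a sum
theorem pv_emod_add_left (a b N : Int) : (a.emod N + b).emod N = (a + b).emod N := by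
  show ((a % N) + b) % N = (a + b) % N
  conv_rhs => rw [Int.add_emod]
  rw [Int.add_emod (a % N), Int.emod_emod_of_dvd _ dvd_rfl]

theorem pv_emod_self (a N : Int) (h0 : 0 ≤ a) (h1 : a < N) : a.emod N = a :=
  Int.emod_eq_of_lt h0 h1

theorem pv_emod_shift (a c N : Int) : (a + N * c).emod N = a.emod N := by
  show (a + N * c) % N = a % N
  simp [Int.add_mul_emod_self_left]

-- the loop of A scans positions (index + step*(k+1)) % n, k = 0,1,…, and returns the first selectable one
theorem pv_loopA_eq (sel : List Bool) (step ci : Int) (hn : 0 < (sel.length : Int)) :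
    ∀ (f : Nat) (index : Int),
      pvLoopA sel (sel.length : Int) step ci f index =
        ((((List.range f).map (fun (k : Nat) => (index + step * ((k : Int) + 1)).emod (sel.length : Int))).find?
            (fun p => sel.getD p.toNat false)).getD ci) := by
  intro f
  induction f with
  | zero => intro index; simp [pvLoopA]
  | succ f ih =>
    intro index
    rw [List.range_succ_eq_map, List.map_cons, List.map_map]
    set N : Int := (sel.length : Int) with hN
    have hidx : PySem.Int.mod (index + step) N = (index + step).emod N :=
      PySem.Int.mod_eq_emod_of_pos hn
    have hrange : 0 ≤ (index + step).emod N ∧ (index + step).emod N < N :=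
      ⟨Int.emod_nonneg _ (by omega), Int.emod_lt_of_pos _ hn⟩
    have hget : PySem.List.pyGetD sel ((index + step).emod N) false =
        sel.getD ((index + step).emod N).toNat false := by
      rw [PySem.List.pyGetD_eq_getElem sel false hrange.1 (by exact_mod_cast hrange.2)]
      rw [List.getD_eq_getElem _ _ (by
        have := hrange.2
        omega)]
    show (if PySem.List.pyGetD sel (PySem.Int.mod (index + step) N) false then PySem.Int.mod (index + step) N
          else pvLoopA sel N step ci f (PySem.Int.mod (index + step) N)) = _
    rw [hidx, hget]
    have h0 : (index + step * ((0:Nat) + 1 : Int)).emod N = (index + step).emod N := by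
      norm_num
    by_cases hfirst : sel.getD ((index + step).emod N).toNat false = true
    · simp only [hfirst, if_true]
      rw [List.find?_cons_of_pos (by rw [h0]; exact hfirst)]
      simp
    · simp only [hfirst, if_false, Bool.false_eq_true]
      rw [List.find?_cons_of_neg (by rw [h0]; simpa [List.getD] using hfirst)]
      rw [ih ((index + step).emod N)]
      congr 1
      congr 1
      apply List.map_congr_left
      intro k hk
      show ((index + step).emod N + step * ((k:Int)+1)).emod N
          = (index + step * (((Nat.succ k : Nat) : Int) + 1)).emod N
      rw [pv_emod_add_left]
      congr 1
      push_cast [Nat.succ_eq_add_one]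
      ring

-- the scan list returns the first selectable position, packaged for the main proof
theorem pv_find_first (sel : List Bool) (s step m : Int) (k0 : Nat)
    (hk0n : k0 < sel.length)
    (hk0 : (s + step * ((k0 : Int) + 1)).emod (sel.length : Int) = m)
    (hmsel : sel.getD m.toNat false = true)
    (hbef : ∀ (i : Nat), i < k0 →
      sel.getD ((s + step * ((i : Int) + 1)).emod (sel.length : Int)).toNat false = false) :
    ((List.range sel.length).map
        (fun (k : Nat) => (s + step * ((k : Int) + 1)).emod (sel.length : Int))).find?
      (fun p => sel.getD p.toNat false) = some m := by
  have hlen : ((List.range sel.length).map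
      (fun (k : Nat) => (s + step * ((k : Int) + 1)).emod (sel.length : Int))).length = sel.length := by
    simp
  have := pv_find?_eq_some (fun p => sel.getD p.toNat false)
    ((List.range sel.length).map
      (fun (k : Nat) => (s + step * ((k : Int) + 1)).emod (sel.length : Int)))
    k0 (by omega)
    (by
      intro i hi
      simpa using hbef i hi)
    (by simpa [hk0] using hmsel)
  rw [this]
  simp [hk0]

-- ===== VERDICT (by name: the statement is the Claim_ definition above) =====
theorem next_player_select_index_spec : Claim_equal_next_player_select_index := by
  intro ci d sel _
  unfold Spec_next_player_select_index
  simp only [next_player_select_index, next_player_select_index_alt]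
  by_cases hlen : ((sel.length : Int) ≤ 0)
  · simp only [if_pos hlen]
  · simp only [if_neg hlen]
    have hn : 0 < (sel.length : Int) := by omega
    by_cases hany : sel.any (fun b => b) = true
    case neg =>
      have hnil : pvIdx sel = [] := (pv_idx_nil sel).mpr (by simpa using hany)
      simp [hany, hnil]
    case pos =>
      have hne : pvIdx sel ≠ [] := by
        intro h; rw [pv_idx_nil sel] at h; simp [hany] at h
      rw [if_neg (by simp [hany]), if_neg hne]
      set s : Int := PySem.Int.mod ci (sel.length : Int) with hsdef
      have hsE : s = ci.emod (sel.length : Int) := PySem.Int.mod_eq_emod_of_pos hn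
      have hs0 : 0 ≤ s := PySem.Int.mod_nonneg ci hn
      have hsN : s < (sel.length : Int) := PySem.Int.mod_lt ci hn
      have hpw := pv_idx_pairwise sel
      have h0len : 0 < (pvIdx sel).length := List.length_pos_of_ne_nil hne
      have helem : ∀ (i : Nat) (h : i < (pvIdx sel).length),
          0 ≤ (pvIdx sel)[i] ∧ (pvIdx sel)[i] < (sel.length : Int) ∧
            sel.getD (pvIdx sel)[i].toNat false = true := by
        intro i h
        obtain ⟨k, hk, hEq, hsel⟩ := (pv_mem_idx sel (pvIdx sel)[i]).mp (List.getElem_mem h)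
        refine ⟨by omega, by rw [hEq]; exact_mod_cast hk, ?_⟩
        rw [hEq]
        have htk : ((k : Int)).toNat = k := Int.toNat_natCast k
        rw [htk, List.getD_eq_getElem sel false hk]
        exact hsel
      have hmem' : ∀ v : Int, 0 ≤ v → v < (sel.length : Int) →
          sel.getD v.toNat false = true → v ∈ pvIdx sel := by
        intro v h0 h1 hsel
        have hk : v.toNat < sel.length := by omega
        refine (pv_mem_idx sel v).mpr ⟨v.toNat, hk, by omega, ?_⟩
        rw [List.getD_eq_getElem sel false hk] at hsel
        exact hsel
      by_cases hd : d < 0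
      · -- backward
        simp only [if_pos hd]
        rw [pv_loopA_eq sel (-1) ci hn sel.length ci]
        have hshift : (List.range sel.length).map
            (fun (k : Nat) => (ci + (-1) * ((k : Int) + 1)).emod (sel.length : Int)) =
            (List.range sel.length).map
            (fun (k : Nat) => (s + (-1) * ((k : Int) + 1)).emod (sel.length : Int)) := by
          apply List.map_congr_left; intro k _
          rw [hsE, pv_emod_add_left]
        rw [hshift]
        have rank := pv_rank_lt hpw s
        have hcle : (pvIdx sel).countP (fun j => decide (j < s)) ≤ (pvIdx sel).length :=
          List.countP_le_length
        by_cases hpos : (0 : Int) ≤ ((pvIdx sel).countP (fun j => decide (j < s)) : Int) - 1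
        · set c : Nat := (pvIdx sel).countP (fun j => decide (j < s)) with hcdef
          have hc1 : c - 1 < (pvIdx sel).length := by omega
          obtain ⟨hm0, hmN, hmsel⟩ := helem (c-1) hc1
          have hms : (pvIdx sel)[c-1] < s := (rank (c-1) hc1).mpr (by omega)
          have hk0E : ((s - (pvIdx sel)[c-1] - 1).toNat : Int) = s - (pvIdx sel)[c-1] - 1 :=
            Int.toNat_of_nonneg (by omega)
          have hk0n : (s - (pvIdx sel)[c-1] - 1).toNat < sel.length := by
            have h2 : ((s - (pvIdx sel)[c-1] - 1).toNat : Int) < (sel.length : Int) := by omega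
            exact_mod_cast h2
          have hfind := pv_find_first sel s (-1) ((pvIdx sel)[c-1]) (s - (pvIdx sel)[c-1] - 1).toNat hk0n
            (by
              have h1 : s + (-1) * (((s - (pvIdx sel)[c-1] - 1).toNat : Int) + 1) = (pvIdx sel)[c-1] := by
                rw [hk0E]; ring
              rw [h1, pv_emod_self _ _ hm0 hmN])
            hmsel
            (by
              intro i hi
              have hiI : (i : Int) < s - (pvIdx sel)[c-1] - 1 := by
                have h2 : ((i : Nat) : Int) < ((s - (pvIdx sel)[c-1] - 1).toNat : Int) := by exact_mod_cast hi
                omega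
              have h1 : s + (-1) * ((i : Int) + 1) = s - (i : Int) - 1 := by ring
              rw [h1, pv_emod_self (s - (i : Int) - 1) _ (by omega) (by omega)]
              cases hvb : sel.getD (s - (i : Int) - 1).toNat false with
              | false => rfl
              | true =>
                exfalso
                have hvmem := hmem' _ (by omega) (by omega) hvb
                obtain ⟨i', hi', hEq⟩ := List.mem_iff_getElem.mp hvmem
                have hlt : (pvIdx sel)[i'] < s := by rw [hEq]; omega
                have hic : i' < c := (rank i' hi').mp hlt
                have hmono := pv_mono hpw (show i' ≤ c - 1 by omega) hc1
                rw [hEq] at hmono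
                omega)
          rw [hfind]
          simp only [Option.getD_some]
          rw [if_pos hpos]
          have hclen : ((c : Int) - 1) < ((pvIdx sel).length : Int) := by omega
          rw [PySem.List.pyGetD_eq_getElem _ 0 hpos hclen]
          have htn : ((c : Int) - 1).toNat = c - 1 := by omega
          simp only [htn]
        · have hc0 : (pvIdx sel).countP (fun j => decide (j < s)) = 0 := by omega
          have hall : ∀ a ∈ pvIdx sel, ¬ (a < s) := by
            intro a ha
            have := List.countP_eq_zero.mp hc0 a ha
            simpa using this
          have hL1 : (pvIdx sel).length - 1 < (pvIdx sel).length := by omega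
          obtain ⟨hm0, hmN, hmsel⟩ := helem ((pvIdx sel).length - 1) hL1
          have hms : s ≤ (pvIdx sel)[(pvIdx sel).length - 1] := by
            have := hall _ (List.getElem_mem hL1); omega
          have hk0E : (((sel.length : Int) + s - (pvIdx sel)[(pvIdx sel).length - 1] - 1).toNat : Int)
              = (sel.length : Int) + s - (pvIdx sel)[(pvIdx sel).length - 1] - 1 :=
            Int.toNat_of_nonneg (by omega)
          have hk0n : ((sel.length : Int) + s - (pvIdx sel)[(pvIdx sel).length - 1] - 1).toNat < sel.length := by
            have h2 : (((sel.length : Int) + s - (pvIdx sel)[(pvIdx sel).length - 1] - 1).toNat : Int)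
                < (sel.length : Int) := by omega
            exact_mod_cast h2
          have hfind := pv_find_first sel s (-1) ((pvIdx sel)[(pvIdx sel).length - 1])
              ((sel.length : Int) + s - (pvIdx sel)[(pvIdx sel).length - 1] - 1).toNat hk0n
            (by
              have h1 : s + (-1) * ((((sel.length : Int) + s - (pvIdx sel)[(pvIdx sel).length - 1] - 1).toNat : Int) + 1)
                  = (pvIdx sel)[(pvIdx sel).length - 1] + (sel.length : Int) * (-1) := by
                rw [hk0E]; ring
              rw [h1, pv_emod_shift, pv_emod_self _ _ hm0 hmN])
            hmsel
            (by
              intro i hi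
              have hiI : (i : Int) < (sel.length : Int) + s - (pvIdx sel)[(pvIdx sel).length - 1] - 1 := by
                have h2 : ((i : Nat) : Int) < (((sel.length : Int) + s - (pvIdx sel)[(pvIdx sel).length - 1] - 1).toNat : Int) := by
                  exact_mod_cast hi
                omega
              by_cases hv : 0 ≤ s - (i : Int) - 1
              · have h1 : s + (-1) * ((i : Int) + 1) = s - (i : Int) - 1 := by ring
                rw [h1, pv_emod_self (s - (i : Int) - 1) _ hv (by omega)]
                cases hvb : sel.getD (s - (i : Int) - 1).toNat false with
                | false => rfl
                | true =>
                  exfalso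
                  have hvmem := hmem' _ (by omega) (by omega) hvb
                  exact hall _ hvmem (by omega)
              · have h1 : s + (-1) * ((i : Int) + 1) = (s - (i : Int) - 1 + (sel.length : Int)) + (sel.length : Int) * (-1) := by
                  ring
                rw [h1, pv_emod_shift, pv_emod_self (s - (i : Int) - 1 + (sel.length : Int)) _ (by omega) (by omega)]
                cases hvb : sel.getD (s - (i : Int) - 1 + (sel.length : Int)).toNat false with
                | false => rfl
                | true =>
                  exfalso
                  have hvmem := hmem' _ (by omega) (by omega) hvb
                  obtain ⟨i', hi', hEq⟩ := List.mem_iff_getElem.mp hvmem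
                  have hmono := pv_mono hpw (show i' ≤ (pvIdx sel).length - 1 by omega) hL1
                  rw [hEq] at hmono
                  omega)
          rw [hfind]
          simp only [Option.getD_some]
          rw [if_neg hpos]
          rw [PySem.List.pyGetD_neg_one _ 0 hne]
          rw [List.getLast_eq_getElem]
      · -- forward
        simp only [if_neg hd]
        rw [pv_loopA_eq sel 1 ci hn sel.length ci]
        have hshift : (List.range sel.length).map
            (fun (k : Nat) => (ci + 1 * ((k : Int) + 1)).emod (sel.length : Int)) =
            (List.range sel.length).map
            (fun (k : Nat) => (s + 1 * ((k : Int) + 1)).emod (sel.length : Int)) := by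
          apply List.map_congr_left; intro k _
          rw [hsE, pv_emod_add_left]
        rw [hshift]
        have rank := pv_rank_le hpw s
        have hcle : (pvIdx sel).countP (fun j => decide (j ≤ s)) ≤ (pvIdx sel).length :=
          List.countP_le_length
        by_cases hpos : ((pvIdx sel).countP (fun j => decide (j ≤ s)) : Int) < ((pvIdx sel).length : Int)
        · set c : Nat := (pvIdx sel).countP (fun j => decide (j ≤ s)) with hcdef
          have hc1 : c < (pvIdx sel).length := by omega
          obtain ⟨hm0, hmN, hmsel⟩ := helem c hc1
          have hms : s < (pvIdx sel)[c] := by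
            by_contra hcon
            exact absurd ((rank c hc1).mp (by omega)) (by omega)
          have hk0E : (((pvIdx sel)[c] - s - 1).toNat : Int) = (pvIdx sel)[c] - s - 1 :=
            Int.toNat_of_nonneg (by omega)
          have hk0n : ((pvIdx sel)[c] - s - 1).toNat < sel.length := by
            have h2 : (((pvIdx sel)[c] - s - 1).toNat : Int) < (sel.length : Int) := by omega
            exact_mod_cast h2
          have hfind := pv_find_first sel s 1 ((pvIdx sel)[c]) ((pvIdx sel)[c] - s - 1).toNat hk0n
            (by
              have h1 : s + 1 * ((((pvIdx sel)[c] - s - 1).toNat : Int) + 1) = (pvIdx sel)[c] := by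
                rw [hk0E]; ring
              rw [h1, pv_emod_self _ _ hm0 hmN])
            hmsel
            (by
              intro i hi
              have hiI : (i : Int) < (pvIdx sel)[c] - s - 1 := by
                have h2 : ((i : Nat) : Int) < (((pvIdx sel)[c] - s - 1).toNat : Int) := by exact_mod_cast hi
                omega
              have h1 : s + 1 * ((i : Int) + 1) = s + (i : Int) + 1 := by ring
              rw [h1, pv_emod_self (s + (i : Int) + 1) _ (by omega) (by omega)]
              cases hvb : sel.getD (s + (i : Int) + 1).toNat false with
              | false => rfl
              | true =>
                exfalso
                have hvmem := hmem' _ (by omega) (by omega) hvb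
                obtain ⟨i', hi', hEq⟩ := List.mem_iff_getElem.mp hvmem
                have hgt : ¬ ((pvIdx sel)[i'] ≤ s) := by rw [hEq]; omega
                have hic : ¬ (i' < c) := fun hlt => hgt ((rank i' hi').mpr hlt)
                have hmono := pv_mono hpw (show c ≤ i' by omega) hi'
                rw [hEq] at hmono
                omega)
          rw [hfind]
          simp only [Option.getD_some]
          rw [if_pos hpos]
          have hc0' : (0 : Int) ≤ (c : Int) := by omega
          rw [PySem.List.pyGetD_eq_getElem _ 0 hc0' (by omega)]
          have htn : ((c : Nat) : Int).toNat = c := by omega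
          simp only [htn]
        · have hcall : ∀ a ∈ pvIdx sel, a ≤ s := by
            have hceq : (pvIdx sel).countP (fun j => decide (j ≤ s)) = (pvIdx sel).length := by omega
            intro a ha
            have := List.countP_eq_length.mp hceq a ha
            simpa using this
          obtain ⟨hm0, hmN, hmsel⟩ := helem 0 h0len
          have hms : (pvIdx sel)[0] ≤ s := hcall _ (List.getElem_mem h0len)
          have hk0E : (((sel.length : Int) - s - 1 + (pvIdx sel)[0]).toNat : Int)
              = (sel.length : Int) - s - 1 + (pvIdx sel)[0] :=
            Int.toNat_of_nonneg (by omega)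
          have hk0n : ((sel.length : Int) - s - 1 + (pvIdx sel)[0]).toNat < sel.length := by
            have h2 : (((sel.length : Int) - s - 1 + (pvIdx sel)[0]).toNat : Int) < (sel.length : Int) := by omega
            exact_mod_cast h2
          have hfind := pv_find_first sel s 1 ((pvIdx sel)[0])
              ((sel.length : Int) - s - 1 + (pvIdx sel)[0]).toNat hk0n
            (by
              have h1 : s + (1 : Int) * ((((sel.length : Int) - s - 1 + (pvIdx sel)[0]).toNat : Int) + (1 : Int))
                  = (pvIdx sel)[0] + (sel.length : Int) * 1 := by
                rw [hk0E]; ring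
              rw [h1, pv_emod_shift, pv_emod_self _ _ hm0 hmN])
            hmsel
            (by
              intro i hi
              have hiI : (i : Int) < (sel.length : Int) - s - 1 + (pvIdx sel)[0] := by
                have h2 : ((i : Nat) : Int) < (((sel.length : Int) - s - 1 + (pvIdx sel)[0]).toNat : Int) := by
                  exact_mod_cast hi
                omega
              by_cases hv : s + (i : Int) + 1 < (sel.length : Int)
              · have h1 : s + 1 * ((i : Int) + 1) = s + (i : Int) + 1 := by ring
                rw [h1, pv_emod_self (s + (i : Int) + 1) _ (by omega) hv]
                cases hvb : sel.getD (s + (i : Int) + 1).toNat false with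
                | false => rfl
                | true =>
                  exfalso
                  have hvmem := hmem' _ (by omega) (by omega) hvb
                  have := hcall _ hvmem
                  omega
              · have h1 : s + 1 * ((i : Int) + 1) = (s + (i : Int) + 1 - (sel.length : Int)) + (sel.length : Int) * 1 := by
                  ring
                rw [h1, pv_emod_shift, pv_emod_self (s + (i : Int) + 1 - (sel.length : Int)) _ (by omega) (by omega)]
                cases hvb : sel.getD (s + (i : Int) + 1 - (sel.length : Int)).toNat false with
                | false => rfl
                | true =>
                  exfalso
                  have hvmem := hmem' _ (by omega) (by omega) hvb
                  obtain ⟨i', hi', hEq⟩ := List.mem_iff_getElem.mp hvmem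
                  have hmono := pv_mono hpw (show 0 ≤ i' by omega) hi'
                  rw [hEq] at hmono
                  omega)
          rw [hfind]
          simp only [Option.getD_some]
          rw [if_neg hpos]
          rw [PySem.List.pyGetD_zero]
          rw [List.getD_eq_getElem _ _ h0len]
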